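-- pv_equiv track=rewrite | github.com/planned-diffusion/planned-diffusion | train/sft_trainer.py | is_valid_sample
-- ===== SOURCE A (Python) =====
-- def is_valid_sample(sample, completion_tokens):
--     """Sophisticated validation using tokenized completion and stack-based async tracking"""
--     if not sample.get("prompt") or not sample.get("completion"):
--         return False
--
--     # Track async block state - but reject nested blocks
--     in_async_block = False
--
--     for token in completion_tokens:
--         if token == "<async>":
--             # Reject nested async blocks
--             if in_async_block:
--                 return False
--             in_async_block = True
--         elif token == "</async>":
--             # Found closing tag without opening tag
--             if not in_async_block:
--                 return False
--             in_async_block = False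
--
--     # Valid if we're not currently inside an async block
--     return not in_async_block
-- ===== SOURCE B (Python) =====
-- def is_valid_sample(sample, completion_tokens):
--     if not sample.get("prompt") or not sample.get("completion"):
--         return False
--     markers = [t for t in completion_tokens if t in ("<async>", "</async>")]
--     return len(markers) % 2 == 0 and all(
--         m == ("<async>" if i % 2 == 0 else "</async>")
--         for i, m in enumerate(markers)
--     )
-- ===== Notes on version B (the rewrite author's own statement) =====
-- stated objective: simpler
-- what changed: Replaces the stateful in/out boolean flag loop with early returns by a filter of the two marker tokens followed by a stateless even-length and index-parity alternation check.
import Mathlib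
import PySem

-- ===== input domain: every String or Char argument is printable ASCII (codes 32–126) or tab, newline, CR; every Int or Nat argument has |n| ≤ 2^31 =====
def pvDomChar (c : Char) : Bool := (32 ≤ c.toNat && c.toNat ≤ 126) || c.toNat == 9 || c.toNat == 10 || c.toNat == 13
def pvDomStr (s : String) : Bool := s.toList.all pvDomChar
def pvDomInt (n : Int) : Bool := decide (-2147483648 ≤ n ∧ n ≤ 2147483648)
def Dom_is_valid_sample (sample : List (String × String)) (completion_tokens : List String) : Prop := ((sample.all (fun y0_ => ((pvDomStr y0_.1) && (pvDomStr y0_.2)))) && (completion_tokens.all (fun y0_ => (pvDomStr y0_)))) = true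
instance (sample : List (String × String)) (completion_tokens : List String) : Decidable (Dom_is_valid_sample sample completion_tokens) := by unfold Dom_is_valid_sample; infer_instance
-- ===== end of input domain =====

-- B replaces A's stateful boolean-flag loop by filtering the marker tokens and
-- checking even length plus index-parity alternation (objective: simpler).


-- ===== PORT A =====
-- dict lookup (first match in the association list) shared by both ports' identical guard
def pvGetVal (sample : List (String × String)) (k : String) : Option String :=
  match sample with
  | [] => none
  | (k', v) :: rest => if k' == k then some v else pvGetVal rest k

-- truthof `sample.get(k)`: None and "" are falsy
def pvTruthy (o : Option String) : Bool :=
  match o with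
  | none => false
  | some s => s ≠ ""

-- A's for-loop with the in_async_block flag and early `return False`
def pvLoopA : List String → Bool → Bool
  | [], b => !b
  | t :: ts, b =>
    if t == "<async>" then
      if b then false else pvLoopA ts true
    else if t == "</async>" then
      if !b then false else pvLoopA ts false
    else pvLoopA ts b

def is_valid_sample (sample : List (String × String)) (completion_tokens : List String) : Bool :=
  if !pvTruthy (pvGetVal sample "prompt") || !pvTruthy (pvGetVal sample "completion") then false
  else pvLoopA completion_tokens false

-- ===== PORT B =====
def pvIsMarker (t : String) : Bool := t == "<async>" || t == "</async>"

-- `all(m == (… if i % 2 == 0 else …) for i, m in enumerate(markers))`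
def pvChkFrom : Nat → List String → Bool
  | _, [] => true
  | i, m :: ms => (m == (if i % 2 == 0 then "<async>" else "</async>")) && pvChkFrom (i + 1) ms

def is_valid_sample_alt (sample : List (String × String)) (completion_tokens : List String) : Bool :=
  if !pvTruthy (pvGetVal sample "prompt") || !pvTruthy (pvGetVal sample "completion") then false
  else
    let markers := completion_tokens.filter pvIsMarker
    (markers.length % 2 == 0) && pvChkFrom 0 markers

-- ===== PRECONDITION & SPEC =====
def Spec_is_valid_sample (sample : List (String × String)) (completion_tokens : List String) (out : Bool) : Prop := out = is_valid_sample_alt sample completion_tokens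
instance (sample : List (String × String)) (completion_tokens : List String) (out : Bool) : Decidable (Spec_is_valid_sample sample completion_tokens out) := by unfold Spec_is_valid_sample; infer_instance

-- ===== CLAIM (what is proved, stated in full; the proofs are below) =====
def Claim_equal_is_valid_sample : Prop := ∀ (sample : List (String × String)) (completion_tokens : List String), Dom_is_valid_sample sample completion_tokens → Spec_is_valid_sample sample completion_tokens (is_valid_sample sample completion_tokens)

-- ===== LEMMAS AND PROOFS =====

-- non-marker tokens do not change A's loop state
theorem pvLoopA_filter (ts : List String) (b : Bool) :
    pvLoopA ts b = pvLoopA (ts.filter pvIsMarker) b := by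
  induction ts generalizing b with
  | nil => rfl
  | cons t ts ih =>
    by_cases h1 : t = "<async>"
    · subst h1; simp [pvLoopA, List.filter, pvIsMarker]
      cases b <;> simp [ih]
    · by_cases h2 : t = "</async>"
      · subst h2; simp [pvLoopA, List.filter, pvIsMarker]
        cases b <;> simp [ih]
      · have hf : (t == "<async>" || t == "</async>") = false := by simp [h1, h2]
        simp [pvLoopA, List.filter, pvIsMarker, h1, h2, hf, ih]

-- on marker-only lists, A's loop equals B's parity/alternation check
theorem pvLoopA_markers (ms : List String) (h : ∀ m ∈ ms, m = "<async>" ∨ m = "</async>") :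
    ∀ i : Nat, pvLoopA ms (i % 2 == 1) = ((decide (ms.length % 2 = i % 2)) && pvChkFrom i ms) := by
  induction ms with
  | nil =>
    intro i
    rcases Nat.even_or_odd i with he | he
    · have h0 : i % 2 = 0 := Nat.even_iff.mp he
      simp [pvLoopA, pvChkFrom, h0]
    · have h0 : i % 2 = 1 := Nat.odd_iff.mp he
      simp [pvLoopA, pvChkFrom, h0]
  | cons m ms ih =>
    intro i
    have hm := h m (by simp)
    have hms : ∀ m ∈ ms, m = "<async>" ∨ m = "</async>" := fun x hx => h x (by simp [hx])
    have ih' := ih hms (i + 1)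
    rcases hm with hm | hm <;> subst hm <;>
      rcases Nat.even_or_odd i with he | he
    · have h0 : i % 2 = 0 := Nat.even_iff.mp he
      have h1 : (i + 1) % 2 = 1 := by omega
      rw [h1] at ih'
      simp at ih'
      simp [pvLoopA, pvChkFrom, h0, ih']
      exact congrArg (· && pvChkFrom (i + 1) ms) (decide_eq_decide.mpr (by omega))
    · have h0 : i % 2 = 1 := Nat.odd_iff.mp he
      simp [pvLoopA, pvChkFrom, h0]
    · have h0 : i % 2 = 0 := Nat.even_iff.mp he
      simp [pvLoopA, pvChkFrom, h0]
    · have h0 : i % 2 = 1 := Nat.odd_iff.mp he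
      have h1 : (i + 1) % 2 = 0 := by omega
      rw [h1] at ih'
      simp at ih'
      simp [pvLoopA, pvChkFrom, h0, ih']
      exact congrArg (· && pvChkFrom (i + 1) ms) (decide_eq_decide.mpr (by omega))

-- ===== VERDICT (by name: the statement is the Claim_ definition above) =====
theorem is_valid_sample_spec : Claim_equal_is_valid_sample := by
  intro sample ct _
  unfold Spec_is_valid_sample is_valid_sample is_valid_sample_alt
  by_cases hg : (!pvTruthy (pvGetVal sample "prompt") || !pvTruthy (pvGetVal sample "completion")) = true
  · simp [hg]
  · have hg' : (!pvTruthy (pvGetVal sample "prompt") || !pvTruthy (pvGetVal sample "completion")) = false := Bool.eq_false_iff.mpr hg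
    simp only [hg', Bool.false_eq_true, if_false]
    have hmark : ∀ m ∈ ct.filter pvIsMarker, m = "<async>" ∨ m = "</async>" := by
      intro m hm
      have := List.of_mem_filter hm
      simp [pvIsMarker] at this
      tauto
    have hkey := pvLoopA_markers (ct.filter pvIsMarker) hmark 0
    simp at hkey
    rw [pvLoopA_filter ct false]
    simpa using hkey
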